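-- pv_equiv track=rewrite | github.com/joecode0/Project-Euler-Solutions | src/solutions_61-70.py | get_octagonal_numbers
-- ===== SOURCE A (Python) =====
-- def convert_to_dict(numbers, num_digits):
--     output_dict = {}
--     for number in numbers:
--         str_num = str(number)
--         if len(str_num) == num_digits:
--             output_dict[str_num[:2]] = []
--     for number in numbers:
--         str_num = str(number)
--         if len(str_num) == num_digits:
--             output_dict[str(str_num[:2])].append(str(str_num[2:]))
--     return output_dict
--
-- def get_octagonal_numbers(num_digits):
--     octagonal_numbers = []
--     n = 1
--     val = 1
--     while val < 10**num_digits: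
--         val = int(n*(3*n-2))
--         octagonal_numbers.append(val)
--         n += 1
--     return convert_to_dict(octagonal_numbers, num_digits)
-- ===== SOURCE B (Python) =====
-- def get_octagonal_numbers(num_digits):
--     # One fused pass: generate octagonal numbers and group them directly,
--     # without the intermediate list and without a separate key-initialisation scan.
--     groups = {}
--     limit = 10 ** num_digits
--     n = 1
--     val = 1
--     while val < limit:
--         val = n * (3 * n - 2)
--         s = str(val)
--         if len(s) == num_digits:
--             groups.setdefault(s[:2], []).append(s[2:])
--         n += 1
--     return groups
-- ===== Notes on version B (the rewrite author's own statement) =====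
-- stated objective: simpler
-- what changed: B fuses A's three passes (build the full list of octagonal numbers, a first scan to initialise every key with [], a second scan to append the tails) into one generate-and-group loop that drops the intermediate list and groups each value directly via setdefault.
import Mathlib
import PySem

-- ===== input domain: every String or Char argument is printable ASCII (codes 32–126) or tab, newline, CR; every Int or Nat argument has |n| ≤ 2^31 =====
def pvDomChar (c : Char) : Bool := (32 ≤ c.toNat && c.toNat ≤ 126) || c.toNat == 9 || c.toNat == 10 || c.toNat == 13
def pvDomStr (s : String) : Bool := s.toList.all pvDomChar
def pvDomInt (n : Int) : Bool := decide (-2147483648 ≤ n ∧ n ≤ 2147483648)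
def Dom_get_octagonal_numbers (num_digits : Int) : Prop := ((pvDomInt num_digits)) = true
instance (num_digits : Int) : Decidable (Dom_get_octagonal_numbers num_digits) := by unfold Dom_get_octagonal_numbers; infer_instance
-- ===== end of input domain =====

-- B fuses A's three passes (generate a list, initialise every key with [], append every tail)
-- into one generate-and-group loop over a dict; objective: simpler (and it drops the intermediate list).

-- ===== PORT A =====
-- the 'while val < 10**num_digits: val = n*(3*n-2); append; n += 1' loop, fuel-bounded for
-- totality (the fuel 10^num_digits + 2 exceeds the loop's iteration count, so it never runs out)
def pvGenOct (bound : Int) : Nat → Int → Int → List Int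
  | 0, _, _ => []
  | fuel + 1, n, val =>
    if val < bound then
      let v := n * (3 * n - 2)
      v :: pvGenOct bound fuel (n + 1) v
    else []

def convert_to_dict (numbers : List Int) (num_digits : Int) : PySem.Dict String (List String) :=
  let d1 := numbers.foldl (fun output_dict number =>
      let str_num := PySem.Int.toStr number
      if PySem.Str.len str_num == num_digits then
        output_dict.insert (PySem.Str.slice str_num none (some 2)) []
      else output_dict) PySem.Dict.empty
  -- Python's output_dict[k].append(t) = modify k (· ++ [t]); the key is always present here
  -- (inserted by the first loop), so no KeyError is reachable.  str() of a str is the identity.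
  numbers.foldl (fun output_dict number =>
      let str_num := PySem.Int.toStr number
      if PySem.Str.len str_num == num_digits then
        output_dict.modify (PySem.Str.slice str_num none (some 2)) []
          (fun v => v ++ [PySem.Str.slice str_num (some 2) none])
      else output_dict) d1

-- for num_digits ≤ 0 Python's bound 10**num_digits is ≤ 1 and the loop body never runs,
-- exactly as with this bound 10^(num_digits.toNat) = 1.
def get_octagonal_numbers (num_digits : Int) : List (String × List String) :=
  let bound : Int := 10 ^ num_digits.toNat
  (convert_to_dict (pvGenOct bound (bound.toNat + 2) 1 1) num_digits).items

-- ===== PORT B =====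
-- body of B's single loop: filter by length and group via setdefault(k, []).append(t)
def pvGroupStep (num_digits : Int) (groups : PySem.Dict String (List String)) (v : Int) :
    PySem.Dict String (List String) :=
  let s := PySem.Int.toStr v
  if PySem.Str.len s == num_digits then
    (groups.setdefault (PySem.Str.slice s none (some 2)) []).modify
      (PySem.Str.slice s none (some 2)) [] (fun g => g ++ [PySem.Str.slice s (some 2) none])
  else groups

def pvOctLoop (bound num_digits : Int) :
    Nat → Int → Int → PySem.Dict String (List String) → PySem.Dict String (List String)
  | 0, _, _, groups => groups
  | fuel + 1, n, val, groups =>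
    if val < bound then
      let v := n * (3 * n - 2)
      pvOctLoop bound num_digits fuel (n + 1) v (pvGroupStep num_digits groups v)
    else groups

def get_octagonal_numbers_alt (num_digits : Int) : List (String × List String) :=
  let bound : Int := 10 ^ num_digits.toNat
  (pvOctLoop bound num_digits (bound.toNat + 2) 1 1 PySem.Dict.empty).items

-- ===== PRECONDITION & SPEC =====
def Spec_get_octagonal_numbers (num_digits : Int) (out : List (String × List String)) : Prop := out = get_octagonal_numbers_alt num_digits
instance (num_digits : Int) (out : List (String × List String)) : Decidable (Spec_get_octagonal_numbers num_digits out) := by unfold Spec_get_octagonal_numbers; infer_instance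

-- ===== CLAIM (what is proved, stated in full; the proofs are below) =====
def Claim_equal_get_octagonal_numbers : Prop := ∀ (num_digits : Int), Dom_get_octagonal_numbers num_digits → Spec_get_octagonal_numbers num_digits (get_octagonal_numbers num_digits)

-- ===== LEMMAS AND PROOFS =====

-- abbreviations used only by the proofs
def pvP (d v : Int) : Bool := PySem.Str.len (PySem.Int.toStr v) == d
def pvK (v : Int) : String := PySem.Str.slice (PySem.Int.toStr v) none (some 2)
def pvT (v : Int) : String := PySem.Str.slice (PySem.Int.toStr v) (some 2) none
def pvTails (d : Int) (c : String) (l : List Int) : List String :=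
  (l.filter (fun v => pvP d v && (pvK v == c))).map pvT

-- clean forms of the three loop bodies (definitionally equal to the lambdas in the ports)
def pvStep1 (d : Int) (od : PySem.Dict String (List String)) (v : Int) :
    PySem.Dict String (List String) :=
  if pvP d v then od.insert (pvK v) [] else od
def pvStep2 (d : Int) (od : PySem.Dict String (List String)) (v : Int) :
    PySem.Dict String (List String) :=
  if pvP d v then od.modify (pvK v) [] (fun g => g ++ [pvT v]) else od
def pvStepB (d : Int) (od : PySem.Dict String (List String)) (v : Int) :
    PySem.Dict String (List String) :=
  if pvP d v then (od.setdefault (pvK v) []).modify (pvK v) [] (fun g => g ++ [pvT v]) else od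

theorem pv_convert_eq (l : List Int) (d : Int) :
    convert_to_dict l d = l.foldl (pvStep2 d) (l.foldl (pvStep1 d) PySem.Dict.empty) := rfl

theorem pv_groupStep_eq (d : Int) : pvGroupStep d = pvStepB d := rfl

-- B's loop is the fold of its body over the generated stream
theorem pvOctLoop_eq_foldl (bound d : Int) :
    ∀ (fuel : Nat) (n val : Int) (groups : PySem.Dict String (List String)),
      pvOctLoop bound d fuel n val groups =
        (pvGenOct bound fuel n val).foldl (pvGroupStep d) groups := by
  intro fuel
  induction fuel with
  | zero => intro n val groups; rfl
  | succ f ih =>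
    intro n val groups
    by_cases h : val < bound <;> simp [pvOctLoop, pvGenOct, h, ih]

-- inserting at k turns the key list into Set.add keys k
theorem pv_keys_add {ν : Type} (d : PySem.Dict String ν) (k : String) (v : ν) :
    (d.insert k v).keys = PySem.Set.add d.keys k := by
  by_cases h : d.contains k = true
  · rw [PySem.Dict.keys_insert_of_contains _ _ h]
    have hk : k ∈ d.keys := (PySem.Dict.contains_iff_mem_keys _ _).mp h
    simp [PySem.Set.add, hk]
  · rw [PySem.Dict.keys_insert_of_not_contains _ _ (by simpa using h)]
    have hk : k ∉ d.keys := fun hm => h ((PySem.Dict.contains_iff_mem_keys _ _).mpr hm)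
    simp [PySem.Set.add, hk]

-- key effect of each of the three loop bodies: Set.add when the length matches, no-op otherwise
theorem pv_step1_keys (d : Int) (od : PySem.Dict String (List String)) (v : Int) :
    (pvStep1 d od v).keys = if pvP d v then PySem.Set.add od.keys (pvK v) else od.keys := by
  unfold pvStep1
  by_cases h : pvP d v = true
  · rw [if_pos h, if_pos h, pv_keys_add]
  · rw [if_neg h, if_neg h]

theorem pv_step2_keys (d : Int) (od : PySem.Dict String (List String)) (v : Int) :
    (pvStep2 d od v).keys = if pvP d v then PySem.Set.add od.keys (pvK v) else od.keys := by
  unfold pvStep2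
  by_cases h : pvP d v = true
  · rw [if_pos h, if_pos h, PySem.Dict.keys_modify, pv_keys_add]
  · rw [if_neg h, if_neg h]

theorem pv_stepB_keys (d : Int) (od : PySem.Dict String (List String)) (v : Int) :
    (pvStepB d od v).keys = if pvP d v then PySem.Set.add od.keys (pvK v) else od.keys := by
  unfold pvStepB
  by_cases h : pvP d v = true
  · rw [if_pos h, if_pos h]
    have hc : (od.setdefault (pvK v) []).contains (pvK v) = true := by
      rw [PySem.Dict.contains_setdefault]; simp
    rw [PySem.Dict.keys_modify, PySem.Dict.keys_insert_of_contains _ _ hc,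
        PySem.Dict.keys_setdefault]
    by_cases h2 : od.contains (pvK v) = true
    · have hk := (PySem.Dict.contains_iff_mem_keys _ _).mp h2
      simp [h2, PySem.Set.add, hk]
    · have hk : pvK v ∉ od.keys := fun hm => h2 ((PySem.Dict.contains_iff_mem_keys _ _).mpr hm)
      simp [h2, PySem.Set.add, hk]
  · rw [if_neg h, if_neg h]

-- the common key lemma for any loop whose body has that key effect
theorem pv_fold_keys (d : Int)
    (step : Int → PySem.Dict String (List String) → Int → PySem.Dict String (List String))
    (hstep : ∀ od v, (step d od v).keys =
      if pvP d v then PySem.Set.add od.keys (pvK v) else od.keys) :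
    ∀ (l : List Int) (od : PySem.Dict String (List String)),
      (l.foldl (step d) od).keys = PySem.Set.update od.keys ((l.filter (pvP d)).map pvK) := by
  intro l
  induction l with
  | nil => intro od; rfl
  | cons x l ih =>
    intro od
    rw [List.foldl_cons, ih]
    by_cases h : pvP d x = true
    · rw [List.filter_cons_of_pos h, List.map_cons]
      have hupd : PySem.Set.update od.keys (pvK x :: (l.filter (pvP d)).map pvK)
          = PySem.Set.update (PySem.Set.add od.keys (pvK x)) ((l.filter (pvP d)).map pvK) := rfl
      rw [hupd, hstep, if_pos h]
    · rw [List.filter_cons_of_neg (by simpa using h), hstep, if_neg (by simpa using h)]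

-- value effect of the appending bodies
theorem pv_step2_getD (d : Int) (od : PySem.Dict String (List String)) (v : Int) (c : String) :
    (pvStep2 d od v).getD c []
      = od.getD c [] ++ (if pvP d v && (pvK v == c) then [pvT v] else []) := by
  unfold pvStep2
  by_cases h : pvP d v = true
  · rw [if_pos h, PySem.Dict.getD_modify]
    by_cases hc : c = pvK v
    · rw [if_pos hc, hc]
      simp [h]
    · rw [if_neg hc]
      have : (pvK v == c) = false := by simpa using fun e => hc e.symm
      simp [h, this]
  · have h' : pvP d v = false := by simpa using h
    simp [h']

theorem pv_stepB_getD (d : Int) (od : PySem.Dict String (List String)) (v : Int) (c : String) :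
    (pvStepB d od v).getD c []
      = od.getD c [] ++ (if pvP d v && (pvK v == c) then [pvT v] else []) := by
  unfold pvStepB
  by_cases h : pvP d v = true
  · rw [if_pos h, PySem.Dict.getD_modify]
    by_cases hc : c = pvK v
    · rw [if_pos hc, hc, PySem.Dict.getD_setdefault_self]
      simp [h]
    · rw [if_neg hc]
      rw [PySem.Dict.getD_eq_get?_getD, PySem.Dict.get?_setdefault_of_ne _ _ hc,
          ← PySem.Dict.getD_eq_get?_getD]
      have : (pvK v == c) = false := by simpa using fun e => hc e.symm
      simp [h, this]
  · have h' : pvP d v = false := by simpa using h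
    simp [h']

-- the common value lemma for any loop whose body appends that way
theorem pv_fold_getD (d : Int)
    (step : Int → PySem.Dict String (List String) → Int → PySem.Dict String (List String))
    (hstep : ∀ od v c, (step d od v).getD c [] =
      od.getD c [] ++ (if pvP d v && (pvK v == c) then [pvT v] else [])) :
    ∀ (l : List Int) (od : PySem.Dict String (List String)) (c : String),
      (l.foldl (step d) od).getD c [] = od.getD c [] ++ pvTails d c l := by
  intro l
  induction l with
  | nil => intro od c; simp [pvTails]
  | cons x l ih =>
    intro od c
    rw [List.foldl_cons, ih, hstep]
    unfold pvTails
    by_cases h : (pvP d x && (pvK x == c)) = true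
    · simp [h, List.append_assoc]
    · have h' : (pvP d x && (pvK x == c)) = false := by simpa using h
      simp [h']

-- A's first pass stores only []
theorem pv_fold1_getD (d : Int) :
    ∀ (l : List Int) (od : PySem.Dict String (List String)),
      (∀ c, od.getD c [] = []) →
      ∀ c, (l.foldl (pvStep1 d) od).getD c [] = [] := by
  intro l
  induction l with
  | nil => intro od h c; exact h c
  | cons x l ih =>
    intro od h c
    rw [List.foldl_cons]
    apply ih
    intro c'
    unfold pvStep1
    by_cases hp : pvP d x = true
    · rw [if_pos hp, PySem.Dict.getD_insert]
      split <;> simp [h c']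
    · rw [if_neg hp]; exact h c'

-- Set.update by elements already present is the identity
theorem pv_update_of_subset :
    ∀ (L : List String) (s : PySem.Set String), (∀ x ∈ L, x ∈ s) → PySem.Set.update s L = s := by
  intro L
  induction L with
  | nil => intro s _; rfl
  | cons x L ih =>
    intro s h
    have hx : x ∈ s := h x (by simp)
    have hadd : PySem.Set.add s x = s := by simp [PySem.Set.add, hx]
    have hstep : PySem.Set.update s (x :: L) = PySem.Set.update (PySem.Set.add s x) L := rfl
    rw [hstep, hadd]
    exact ih s (fun y hy => h y (by simp [hy]))

-- the master fact: two-pass grouping and one-pass grouping build dicts with the same items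
theorem pv_items_eq (d : Int) (l : List Int) :
    (convert_to_dict l d).items = (l.foldl (pvGroupStep d) PySem.Dict.empty).items := by
  rw [pv_convert_eq, pv_groupStep_eq]
  set L := (l.filter (pvP d)).map pvK with hL
  have hkeys1 : (l.foldl (pvStep1 d) PySem.Dict.empty).keys = PySem.Set.update [] L := by
    rw [pv_fold_keys d pvStep1 (pv_step1_keys d) l, PySem.Dict.keys_empty]
  have hkeysA : (l.foldl (pvStep2 d) (l.foldl (pvStep1 d) PySem.Dict.empty)).keys
      = PySem.Set.update (PySem.Set.update [] L) L := by
    rw [pv_fold_keys d pvStep2 (pv_step2_keys d) l, hkeys1]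
  have hkeysB : (l.foldl (pvStepB d) PySem.Dict.empty).keys = PySem.Set.update [] L := by
    rw [pv_fold_keys d pvStepB (pv_stepB_keys d) l, PySem.Dict.keys_empty]
  have hsub : ∀ x ∈ L, x ∈ PySem.Set.update ([] : PySem.Set String) L :=
    fun x hx => (PySem.Set.mem_update _ _ _).mpr (Or.inr hx)
  have hkeq : (l.foldl (pvStep2 d) (l.foldl (pvStep1 d) PySem.Dict.empty)).keys
      = (l.foldl (pvStepB d) PySem.Dict.empty).keys := by
    rw [hkeysA, hkeysB, pv_update_of_subset L _ hsub]
  have hnodupB : (l.foldl (pvStepB d) PySem.Dict.empty).keys.Nodup := by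
    rw [hkeysB]; exact PySem.Set.nodup_update _ _ (by simp)
  have hnodupA : (l.foldl (pvStep2 d) (l.foldl (pvStep1 d) PySem.Dict.empty)).keys.Nodup := by
    rw [hkeq]; exact hnodupB
  rw [PySem.Dict.items_eq_map_keys _ hnodupA ([] : List String),
      PySem.Dict.items_eq_map_keys _ hnodupB ([] : List String), hkeq]
  apply List.map_congr_left
  intro k _
  rw [pv_fold_getD d pvStep2 (pv_step2_getD d) l, pv_fold_getD d pvStepB (pv_stepB_getD d) l,
      pv_fold1_getD d l PySem.Dict.empty (fun c => PySem.Dict.getD_empty c []) k,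
      PySem.Dict.getD_empty]

-- ===== VERDICT (by name: the statement is the Claim_ definition above) =====
theorem get_octagonal_numbers_spec : Claim_equal_get_octagonal_numbers := by
  intro num_digits _
  unfold Spec_get_octagonal_numbers get_octagonal_numbers get_octagonal_numbers_alt
  simp only [pvOctLoop_eq_foldl, pv_items_eq]
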